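-- pv_equiv track=rewrite | github.com/tnakaicode/jburkardt-python | boundary_word_hexagon/boundary_word_hexagon.py | boundary_range
-- ===== SOURCE A (Python) =====
-- def boundary_range ( w, p ):
--
-- #*****************************************************************************80
-- #
-- ## boundary_range() determines the range of a polyhex from its boundary word.
-- #
-- #  Discussion:
-- #
-- #    The boundary word describes how to trace the boundary by starting
-- #    at a base point P=(i,j), and taking a sequence of steps of unit length
-- #    in one of 6 directions, as suggested by these diagrams:
-- #
-- #          3     2-----*             3     2     *
-- #      ^        /                ^    \         /
-- #     /        /                /      \       /
-- #    J  4-----P     1          J  4     P-----1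
-- #      /       \                       /
-- #     /         \                     /
-- #    *     5     6             *-----5     6
-- #
-- #          I-->                      I-->
-- #
-- #    If the current position P has parallelogram coordinates (I,J), then
-- #    the step of given index moves to
-- #
-- #      1  (I+1,J)
-- #      2  (I,  J+1)
-- #      3  (I-1,J+1)
-- #      4  (I-1,J)
-- #      5  (I,  J-1)
-- #      6  (I+1,J-1)
-- #
-- #  Licensing:
-- #
-- #    This code is distributed under the MIT license.
-- #
-- #  Modified:
-- #
-- #    20 June 2024
-- #
-- #  Author:
-- #
-- #    John Burkardt
-- #
-- #  Input:
-- #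
-- #    list W: the boundary word.
-- #
-- #    integer P(2): the boundary word starting point.
-- #
-- #  Output:
-- #
-- #    integer IMIN, IMAX, JMIN, JMAX: the I and J ranges of the polyiamond.
-- #
--   imin = p[0]
--   imax = p[0]
--   jmin = p[1]
--   jmax = p[1]
--
--   i = p[0]
--   j = p[1]
--
--   wn = len ( w )
--
--   for k in range ( 0, wn ):
--
--     if ( w[k] == '1' ):
--       i = i + 1
--     elif ( w[k] == '2' ):
--       j = j + 1
--     elif ( w[k] == '3' ):
--       i = i - 1
--       j = j + 1
--     elif ( w[k] == '4' ):
--       i = i - 1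
--     elif ( w[k] == '5' ):
--       j = j - 1
--     elif ( w[k] == '6' ):
--       i = i + 1
--       j = j - 1
--
--     imin = min ( imin, i )
--     imax = max ( imax, i )
--     jmin = min ( jmin, j )
--     jmax = max ( jmax, j )
--
--   return imin, imax, jmin, jmax
-- ===== SOURCE B (Python) =====
-- def boundary_range(w, p):
--     STEP = {'1': (1, 0), '2': (0, 1), '3': (-1, 1),
--             '4': (-1, 0), '5': (0, -1), '6': (1, -1)}
--     pos = [(p[0], p[1])]
--     for c in w:
--         di, dj = STEP.get(c, (0, 0))
--         i, j = pos[-1]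
--         pos.append((i + di, j + dj))
--     ivals = [q[0] for q in pos]
--     jvals = [q[1] for q in pos]
--     return min(ivals), max(ivals), min(jvals), max(jvals)
-- ===== Notes on version B (the rewrite author's own statement) =====
-- stated objective: alternative
-- what changed: B maps each step to a displacement via a dict, materialises the full list of visited positions by prefix-summing the displacements, and then reduces with min/max over the coordinate lists, replacing A's fused single-pass running-bound update.
import Mathlib
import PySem

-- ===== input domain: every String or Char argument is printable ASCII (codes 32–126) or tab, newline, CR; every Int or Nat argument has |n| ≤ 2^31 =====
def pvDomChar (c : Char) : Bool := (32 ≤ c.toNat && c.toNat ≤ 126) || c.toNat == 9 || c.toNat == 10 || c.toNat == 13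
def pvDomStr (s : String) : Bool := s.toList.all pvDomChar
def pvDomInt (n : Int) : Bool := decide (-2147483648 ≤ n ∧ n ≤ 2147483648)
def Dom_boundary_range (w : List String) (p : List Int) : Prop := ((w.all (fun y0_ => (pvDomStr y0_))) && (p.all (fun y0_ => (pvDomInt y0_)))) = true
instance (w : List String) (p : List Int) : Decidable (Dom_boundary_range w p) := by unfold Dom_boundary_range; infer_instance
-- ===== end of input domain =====

-- B builds the visited-position list by prefix-summing dict-looked-up displacements, then reduces with min/max; A fuses the bound updates into one pass. Return values agree wherever A returns.

-- ===== PORT A =====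
-- one iteration of A's loop body: the if/elif chain updating (i, j), then the four bound updates
def brStepA (st : Int × Int × Int × Int × Int × Int) (s : String) : Int × Int × Int × Int × Int × Int :=
  let (imin, imax, jmin, jmax, i, j) := st
  let (i, j) :=
    if s = "1" then (i + 1, j)
    else if s = "2" then (i, j + 1)
    else if s = "3" then (i - 1, j + 1)
    else if s = "4" then (i - 1, j)
    else if s = "5" then (i, j - 1)
    else if s = "6" then (i + 1, j - 1)
    else (i, j)
  (min imin i, max imax i, min jmin j, max jmax j, i, j)

def boundary_range (w : List String) (p : List Int) : Int × Int × Int × Int :=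
  let i0 := PySem.List.pyGetD p 0 0   -- p[0]; Pre_ guarantees the index is in range
  let j0 := PySem.List.pyGetD p 1 0   -- p[1]
  let st := w.foldl brStepA (i0, i0, j0, j0, i0, j0)
  (st.1, st.2.1, st.2.2.1, st.2.2.2.1)

-- ===== PORT B =====
def brDict : PySem.Dict String (Int × Int) :=
  PySem.Dict.ofList [("1", (1, 0)), ("2", (0, 1)), ("3", (-1, 1)), ("4", (-1, 0)), ("5", (0, -1)), ("6", (1, -1))]

def boundary_range_alt (w : List String) (p : List Int) : Int × Int × Int × Int :=
  let i0 := PySem.List.pyGetD p 0 0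
  let j0 := PySem.List.pyGetD p 1 0
  let pos := List.scanl (fun (q : Int × Int) c =>
      let d := PySem.Dict.getD brDict c (0, 0)
      (q.1 + d.1, q.2 + d.2)) (i0, j0) w
  let ivals := pos.map Prod.fst
  let jvals := pos.map Prod.snd
  ((PySem.List.min? ivals (fun x => x)).getD 0,
   (PySem.List.max? ivals (fun x => x)).getD 0,
   (PySem.List.min? jvals (fun x => x)).getD 0,
   (PySem.List.max? jvals (fun x => x)).getD 0)

-- ===== PRECONDITION & SPEC =====
-- Pre_ excludes exactly the inputs where A raises IndexError: p must have at least two elements.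
def Pre_boundary_range (w : List String) (p : List Int) : Prop := 2 ≤ p.length
instance (w : List String) (p : List Int) : Decidable (Pre_boundary_range w p) := by unfold Pre_boundary_range; infer_instance
def pvWitness_boundary_range : List String × List Int := (["1", "2", "x"], [3, -1])

def Spec_boundary_range (w : List String) (p : List Int) (out : Int × Int × Int × Int) : Prop := out = boundary_range_alt w p
instance (w : List String) (p : List Int) (out : Int × Int × Int × Int) : Decidable (Spec_boundary_range w p out) := by unfold Spec_boundary_range; infer_instance

-- ===== CLAIM (what is proved, stated in full; the proofs are below) =====
def Claim_equal_boundary_range : Prop := ∀ (w : List String) (p : List Int), Dom_boundary_range w p → Pre_boundary_range w p → Spec_boundary_range w p (boundary_range w p)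

-- ===== LEMMAS AND PROOFS =====

-- B's scanl step, named for the proofs (definitionally the lambda in boundary_range_alt)
def bStep (q : Int × Int) (c : String) : Int × Int :=
  let d := PySem.Dict.getD brDict c (0, 0)
  (q.1 + d.1, q.2 + d.2)

theorem brDict_mk : brDict = PySem.Dict.mk [("1", (1, 0)), ("2", (0, 1)), ("3", (-1, 1)), ("4", (-1, 0)), ("5", (0, -1)), ("6", (1, -1))] := by decide

-- A's if/elif displacement chain computes exactly B's dict-looked-up displacement
theorem step_eq (s : String) (i j : Int) :
  (if s = "1" then (i + 1, j)
    else if s = "2" then (i, j + 1)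
    else if s = "3" then (i - 1, j + 1)
    else if s = "4" then (i - 1, j)
    else if s = "5" then (i, j - 1)
    else if s = "6" then (i + 1, j - 1)
    else (i, j))
  = (let d := PySem.Dict.getD brDict s (0, 0); (i + d.1, j + d.2)) := by
  have h1 : PySem.Dict.getD brDict "1" (0,0) = (1,0) := by decide
  have h2 : PySem.Dict.getD brDict "2" (0,0) = (0,1) := by decide
  have h3 : PySem.Dict.getD brDict "3" (0,0) = (-1,1) := by decide
  have h4 : PySem.Dict.getD brDict "4" (0,0) = (-1,0) := by decide
  have h5 : PySem.Dict.getD brDict "5" (0,0) = (0,-1) := by decide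
  have h6 : PySem.Dict.getD brDict "6" (0,0) = (1,-1) := by decide
  split_ifs with c1 c2 c3 c4 c5 c6
  · subst c1; rw [h1]; simp
  · subst c2; rw [h2]; simp
  · subst c3; rw [h3]; simp; ring
  · subst c4; rw [h4]; simp; ring
  · subst c5; rw [h5]; simp; ring
  · subst c6; rw [h6]; simp; ring
  · have hz : PySem.Dict.getD brDict s (0,0) = (0,0) := by
      simp [brDict_mk, PySem.Dict.getD, beq_iff_eq,
        Ne.symm c1, Ne.symm c2, Ne.symm c3, Ne.symm c4, Ne.symm c5, Ne.symm c6, PySem.Dict.get?]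
    rw [hz]; simp

theorem brStepA_eq (s : String) (a b c d i j : Int) :
    brStepA (a, b, c, d, i, j) s =
      (min a (bStep (i, j) s).1, max b (bStep (i, j) s).1,
       min c (bStep (i, j) s).2, max d (bStep (i, j) s).2,
       (bStep (i, j) s).1, (bStep (i, j) s).2) := by
  simp only [brStepA, bStep, step_eq s i j]

theorem scanl_head {α β : Type} (f : β → α → β) (b : β) (l : List α) :
    List.scanl f b l = b :: (List.scanl f b l).tail := by
  cases l <;> simp

-- A's fused loop equals running min/max over the positions AFTER the start point
theorem main_lemma (w : List String) : ∀ (a b c d i j : Int),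
    (fun st : Int × Int × Int × Int × Int × Int => (st.1, st.2.1, st.2.2.1, st.2.2.2.1))
      (w.foldl brStepA (a, b, c, d, i, j)) =
    ( (((List.scanl bStep (i, j) w).tail.map Prod.fst).foldl min a),
      (((List.scanl bStep (i, j) w).tail.map Prod.fst).foldl max b),
      (((List.scanl bStep (i, j) w).tail.map Prod.snd).foldl min c),
      (((List.scanl bStep (i, j) w).tail.map Prod.snd).foldl max d) ) := by
  induction w with
  | nil => intro a b c d i j; simp
  | cons s ws ih =>
    intro a b c d i j
    simp only [List.foldl_cons, List.scanl_cons, List.tail_cons, brStepA_eq]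
    have := ih (min a (bStep (i, j) s).1) (max b (bStep (i, j) s).1)
      (min c (bStep (i, j) s).2) (max d (bStep (i, j) s).2) (bStep (i, j) s).1 (bStep (i, j) s).2
    rw [scanl_head bStep (bStep (i, j) s) ws]
    simp only [List.map_cons, List.foldl_cons]
    exact this

-- ===== VERDICT (by name: the statement is the Claim_ definition above) =====
theorem boundary_range_spec : Claim_equal_boundary_range := by
  intro w p _ _
  unfold Spec_boundary_range boundary_range boundary_range_alt
  dsimp only
  have hb : (fun (q : Int × Int) c =>
      let d := PySem.Dict.getD brDict c (0, 0)
      (q.1 + d.1, q.2 + d.2)) = bStep := rfl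
  rw [hb]
  set i0 := PySem.List.pyGetD p 0 0 with hi0
  set j0 := PySem.List.pyGetD p 1 0 with hj0
  rw [scanl_head bStep (i0, j0) w]
  simp only [List.map_cons, PySem.List.min?_id_cons, PySem.List.max?_id_cons, Option.getD_some]
  have := main_lemma w i0 i0 j0 j0 i0 j0
  simp only at this
  rw [this]
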